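-- pv_equiv track=rewrite | github.com/AlexDunnCS/acoustic_fence_algo | binary_fence_sim.py | check_fence_limit_skips
-- ===== SOURCE A (Python) =====
-- SEGMENT_COUNT = 35  # Segments in the fence
--
-- MAX_CHECK_DISTANCE = 4  # Maximum number of segments to test out in one go
--
-- def find_first_fault_in(fence, start, end):
--     # If this is the faulty section
--     if True in fence[start:end] and start + 1 == end:
--         # Return the section id and increment the check counter
--         return {'fault_at': start, 'checks_performed': 1}
--
--     elif True in fence[start:end]:
--         middle = int((start + end) / 2)
--         first_check = find_first_fault_in(fence, start, middle)
--         if first_check['fault_at'] != -1: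
--             return {'fault_at': first_check['fault_at'], 'checks_performed': 1 + first_check['checks_performed']}
--         else:
--             second_check = find_first_fault_in(fence, middle, end)
--             return {'fault_at': second_check['fault_at'], 'checks_performed': (1
--                                                                                + first_check['checks_performed']
--                                                                                + second_check['checks_performed'])}
--     else:
--         return {'fault_at': -1, 'checks_performed': 1}
--
-- def check_fence_limit_skips(fence, max_check_distance=MAX_CHECK_DISTANCE, start=0, end=SEGMENT_COUNT):
--     checks_performed = 0
--     sub_start = start
--     sub_end = start + max_check_distance
--     while sub_start < end:
--         check = find_first_fault_in(fence, sub_start, sub_end)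
--         checks_performed += check['checks_performed']
--         sub_start = check['fault_at'] + 1 if check['fault_at'] != -1 else sub_end
--         sub_end = min(end, sub_start + max_check_distance)
--
--     return checks_performed
-- ===== SOURCE B (Python) =====
-- SEGMENT_COUNT = 35
-- MAX_CHECK_DISTANCE = 4
--
-- def check_fence_limit_skips(fence, max_check_distance=MAX_CHECK_DISTANCE, start=0, end=SEGMENT_COUNT):
--     # Alternative implementation: a prefix-sum table of the True flags answers the
--     # "any fault in range" tests instead of slicing, and the recursive bisection is
--     # replaced by an iterative descent that adds 1 per probed range (plus 1 for each
--     # fault-free left half that is skipped over).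
--     n = len(fence)
--     pref = [0]
--     for v in fence:
--         pref.append(pref[-1] + (1 if v else 0))
--
--     def norm(i):
--         if i < 0:
--             i += n
--         return 0 if i < 0 else (n if i > n else i)
--
--     def has_fault(s, e):
--         a, b = norm(s), norm(e)
--         return a < b and pref[b] - pref[a] > 0
--
--     checks = 0
--     sub_start = start
--     sub_end = start + max_check_distance
--     while sub_start < end:
--         s, e = sub_start, sub_end
--         fault = -1
--         while True:
--             checks += 1
--             if not has_fault(s, e):
--                 break
--             if s + 1 == e:
--                 fault = s
--                 break
--             m = int((s + e) / 2)
--             if has_fault(s, m):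
--                 e = m
--             else:
--                 checks += 1
--                 s = m
--         sub_start = fault + 1 if fault != -1 else sub_end
--         sub_end = min(end, sub_start + max_check_distance)
--     return checks
-- ===== Notes on version B (the rewrite author's own statement) =====
-- stated objective: alternative
-- what changed: B precomputes one prefix-sum table of the True flags and answers every 'any fault in range' test from it instead of slicing the list, and replaces the recursive bisection by an iterative descent loop.
import Mathlib
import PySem

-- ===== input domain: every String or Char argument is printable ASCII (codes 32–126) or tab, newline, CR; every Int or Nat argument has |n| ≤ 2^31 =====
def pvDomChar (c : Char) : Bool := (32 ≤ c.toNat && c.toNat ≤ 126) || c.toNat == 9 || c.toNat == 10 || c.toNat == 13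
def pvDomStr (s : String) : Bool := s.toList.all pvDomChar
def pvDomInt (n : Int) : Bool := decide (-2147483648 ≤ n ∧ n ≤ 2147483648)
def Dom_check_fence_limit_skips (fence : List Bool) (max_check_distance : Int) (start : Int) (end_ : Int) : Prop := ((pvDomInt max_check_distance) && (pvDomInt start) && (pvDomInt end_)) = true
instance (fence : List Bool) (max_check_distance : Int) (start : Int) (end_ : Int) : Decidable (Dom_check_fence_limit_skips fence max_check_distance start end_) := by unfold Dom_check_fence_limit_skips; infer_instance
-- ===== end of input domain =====

-- B replaces A's per-call list slicing by one prefix-sum table of the True flags and A's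
-- recursive bisection by an iterative descent loop; the return value is identical on Pre_.

-- ===== PORT A =====
-- 'True in fence[start:end]'
def pvHasFault (fence : List Bool) (s e : Int) : Bool :=
  (PySem.List.slice fence (some s) (some e)).contains true

-- find_first_fault_in as a fueled recursion (fuel only totalises the same recursion; it is
-- chosen large enough at every call site); result = (fault_at, checks_performed)
def pvFindFFI (fence : List Bool) : Nat → Int → Int → Int × Int
  | 0, _, _ => (-1, 0)
  | fuel+1, s, e =>
    if pvHasFault fence s e = true ∧ s + 1 = e then (s, 1)
    else if pvHasFault fence s e = true then
      let m := Int.tdiv (s + e) 2      -- int((start + end) / 2): truncation toward zero, exact for |·| ≤ 2^32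
      let c1 := pvFindFFI fence fuel s m
      if c1.1 ≠ -1 then (c1.1, 1 + c1.2)
      else
        let c2 := pvFindFFI fence fuel m e
        (c2.1, 1 + c1.2 + c2.2)
    else (-1, 1)

-- the while loop of check_fence_limit_skips (fueled; sub_start strictly increases, so the fuel suffices)
def pvLoopA (fence : List Bool) (mcd end_ : Int) : Nat → Int → Int → Int → Int
  | 0, _, _, acc => acc
  | fuel+1, ss, se, acc =>
    if ss < end_ then
      let c := pvFindFFI fence ((se - ss).toNat + 1) ss se
      let acc' := acc + c.2
      let ss' := if c.1 ≠ -1 then c.1 + 1 else se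
      pvLoopA fence mcd end_ fuel ss' (min end_ (ss' + mcd)) acc'
    else acc

def check_fence_limit_skips (fence : List Bool) (max_check_distance : Int) (start : Int) (end_ : Int) : Int :=
  pvLoopA fence max_check_distance end_ ((end_ - start).toNat + 1) start (start + max_check_distance) 0

-- ===== PORT B =====
-- norm(i): Python slice-bound normalisation, result in [0, n]
def pvNorm (n : Nat) (i : Int) : Int :=
  let j := if i < 0 then i + n else i
  if j < 0 then 0 else if j > n then n else j

-- pref = [0]; for v in fence: pref.append(pref[-1] + (1 if v else 0))
def pvBuildPref (fence : List Bool) : List Int :=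
  fence.foldl (fun pr v => pr ++ [(PySem.List.pyGet? pr (-1)).getD 0 + (if v then 1 else 0)]) [0]

-- has_fault(s, e); pref[b]/pref[a] ported with getD: the indices are provably in range (0 ≤ · ≤ n)
def pvHasFaultP (n : Nat) (pref : List Int) (s e : Int) : Bool :=
  let a := pvNorm n s
  let b := pvNorm n e
  decide (a < b) && decide (pref.getD b.toNat 0 - pref.getD a.toNat 0 > 0)

-- the inner 'while True' descent; result = (fault, checks counter after the loop)
def pvDescend (n : Nat) (pref : List Int) : Nat → Int → Int → Int → Int × Int
  | 0, _, _, acc => (-1, acc)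
  | fuel+1, s, e, acc =>
    let acc1 := acc + 1
    if pvHasFaultP n pref s e = false then (-1, acc1)
    else if s + 1 = e then (s, acc1)
    else
      let m := Int.tdiv (s + e) 2
      if pvHasFaultP n pref s m = true then pvDescend n pref fuel s m acc1
      else pvDescend n pref fuel m e (acc1 + 1)

-- the outer while loop of B
def pvLoopB (n : Nat) (pref : List Int) (mcd end_ : Int) : Nat → Int → Int → Int → Int
  | 0, _, _, acc => acc
  | fuel+1, ss, se, acc =>
    if ss < end_ then
      let r := pvDescend n pref ((se - ss).toNat + 1) ss se 0
      let acc' := acc + r.2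
      let ss' := if r.1 ≠ -1 then r.1 + 1 else se
      pvLoopB n pref mcd end_ fuel ss' (min end_ (ss' + mcd)) acc'
    else acc

def check_fence_limit_skips_alt (fence : List Bool) (max_check_distance : Int) (start : Int) (end_ : Int) : Int :=
  pvLoopB fence.length (pvBuildPref fence) max_check_distance end_
    ((end_ - start).toNat + 1) start (start + max_check_distance) 0

-- ===== PRECONDITION & SPEC =====
-- Pre_ excludes exactly the inputs with max_check_distance ≤ 0 and start < end_, on which the
-- Python A never terminates (the window never advances); A returns on every other input.
def Pre_check_fence_limit_skips (fence : List Bool) (max_check_distance : Int) (start : Int) (end_ : Int) : Prop :=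
  0 < max_check_distance ∨ end_ ≤ start
instance (fence : List Bool) (max_check_distance : Int) (start : Int) (end_ : Int) : Decidable (Pre_check_fence_limit_skips fence max_check_distance start end_) := by unfold Pre_check_fence_limit_skips; infer_instance

def pvWitness_check_fence_limit_skips : List Bool × Int × Int × Int := ([true, false, true], 2, 0, 3)

def Spec_check_fence_limit_skips (fence : List Bool) (max_check_distance : Int) (start : Int) (end_ : Int) (out : Int) : Prop := out = check_fence_limit_skips_alt fence max_check_distance start end_
instance (fence : List Bool) (max_check_distance : Int) (start : Int) (end_ : Int) (out : Int) : Decidable (Spec_check_fence_limit_skips fence max_check_distance start end_ out) := by unfold Spec_check_fence_limit_skips; infer_instance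

-- ===== CLAIM (what is proved, stated in full; the proofs are below) =====
def Claim_equal_check_fence_limit_skips : Prop := ∀ (fence : List Bool) (max_check_distance : Int) (start : Int) (end_ : Int), Dom_check_fence_limit_skips fence max_check_distance start end_ → Pre_check_fence_limit_skips fence max_check_distance start end_ → Spec_check_fence_limit_skips fence max_check_distance start end_ (check_fence_limit_skips fence max_check_distance start end_)

-- ===== LEMMAS AND PROOFS =====

-- number of True flags among the first k segments
def pvCnt (fence : List Bool) (k : Nat) : Int := ((fence.take k).countP (fun b => b) : Int)

-- the part of the prefix table contributed after running count c
def pvTail (c : Int) : List Bool → List Int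
  | [] => []
  | v :: vs => (c + (if v then 1 else 0)) :: pvTail (c + (if v then 1 else 0)) vs

theorem pvPyGet_neg_one (pr : List Int) (c : Int) (h : pr.getLast? = some c) :
    (PySem.List.pyGet? pr (-1)).getD 0 = c := by
  have hne : pr ≠ [] := by intro he; simp [he] at h
  have hlen : 0 < pr.length := List.length_pos_iff.mpr hne
  simp only [PySem.List.pyGet?, PySem.List.pyIdx?]
  rw [List.getLast?_eq_getElem?] at h
  simp [show 1 ≤ pr.length from hlen, h]

theorem pvBuild_aux (fence : List Bool) : ∀ (pr : List Int) (c : Int), pr.getLast? = some c →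
    fence.foldl (fun pr v => pr ++ [(PySem.List.pyGet? pr (-1)).getD 0 + (if v then 1 else 0)]) pr
      = pr ++ pvTail c fence := by
  induction fence with
  | nil => intro pr c _; simp [pvTail]
  | cons v vs ih =>
    intro pr c h
    simp only [List.foldl_cons]
    rw [pvPyGet_neg_one pr c h]
    rw [ih (pr ++ [c + (if v then 1 else 0)]) (c + (if v then 1 else 0)) (by simp)]
    simp [pvTail, List.append_assoc]

theorem pvBuildPref_eq (fence : List Bool) : pvBuildPref fence = 0 :: pvTail 0 fence := by
  unfold pvBuildPref
  rw [pvBuild_aux fence [0] 0 (by simp)]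
  rfl

theorem pvTail_getD (fence : List Bool) : ∀ (c : Int) (i : Nat), i < fence.length →
    (pvTail c fence).getD i 0 = c + pvCnt fence (i + 1) := by
  induction fence with
  | nil => intro c i h; simp at h
  | cons v vs ih =>
    intro c i h
    cases i with
    | zero =>
      simp only [pvTail, List.getD_cons_zero, pvCnt, List.take_succ_cons, List.take_zero,
        List.countP_cons, List.countP_nil]
      cases v <;> simp
    | succ j =>
      simp only [pvTail, List.getD_cons_succ]
      rw [ih _ j (by simpa using h)]
      simp only [pvCnt, List.take_succ_cons, List.countP_cons]
      push_cast
      cases v <;> simp <;> ring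

theorem pvPref_getD (fence : List Bool) (i : Nat) (h : i ≤ fence.length) :
    (pvBuildPref fence).getD i 0 = pvCnt fence i := by
  rw [pvBuildPref_eq]
  cases i with
  | zero => simp [pvCnt]
  | succ j =>
    simp only [List.getD_cons_succ]
    rw [pvTail_getD fence 0 j (by omega)]
    simp

theorem pvCnt_mono (fence : List Bool) {j k : Nat} (h : j ≤ k) : pvCnt fence j ≤ pvCnt fence k := by
  unfold pvCnt
  have hsub : List.Sublist (fence.take j) (fence.take k) := by
    have heq : fence.take j = (fence.take k).take j := by
      rw [List.take_take, Nat.min_eq_left h]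
    rw [heq]
    exact List.take_sublist _ _
  exact_mod_cast hsub.countP_le

theorem pvNorm_eq_clamp (n : Nat) (i : Int) : pvNorm n i = ((PySem.List.clampIdx n i : Nat) : Int) := by
  simp only [pvNorm, PySem.List.clampIdx]
  split_ifs <;> push_cast <;> omega

-- has_fault over the prefix table, written with counts
theorem pvHasFaultP_cnt (fence : List Bool) (s e : Int) :
    pvHasFaultP fence.length (pvBuildPref fence) s e
      = (decide ((PySem.List.clampIdx fence.length s : Int) < (PySem.List.clampIdx fence.length e : Int))
          && decide (pvCnt fence (PySem.List.clampIdx fence.length e)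
                      - pvCnt fence (PySem.List.clampIdx fence.length s) > 0)) := by
  simp only [pvHasFaultP, pvNorm_eq_clamp]
  have ha : ((PySem.List.clampIdx fence.length s : Nat) : Int).toNat = PySem.List.clampIdx fence.length s := by omega
  have hb : ((PySem.List.clampIdx fence.length e : Nat) : Int).toNat = PySem.List.clampIdx fence.length e := by omega
  rw [ha, hb, pvPref_getD fence _ (PySem.List.clampIdx_le _ _), pvPref_getD fence _ (PySem.List.clampIdx_le _ _)]

theorem pvHasFault_cnt (fence : List Bool) (s e : Int) :
    pvHasFault fence s e
      = (decide ((PySem.List.clampIdx fence.length s : Int) < (PySem.List.clampIdx fence.length e : Int))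
          && decide (pvCnt fence (PySem.List.clampIdx fence.length e)
                      - pvCnt fence (PySem.List.clampIdx fence.length s) > 0)) := by
  set a := PySem.List.clampIdx fence.length s with hadef
  set b := PySem.List.clampIdx fence.length e with hbdef
  simp only [pvHasFault, PySem.List.slice]
  by_cases hab : a < b
  · have hdecomp : fence.take b = fence.take a ++ List.take (b - a) (List.drop a fence) := by
      have hb' : b = a + (b - a) := by omega
      rw [hb', List.take_add]
      have hred : a + (b - a) - a = b - a := by omega
      rw [hred]
    have hc : pvCnt fence b = pvCnt fence a + ((List.take (b - a) (List.drop a fence)).countP (fun x => x) : Int) := by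
      unfold pvCnt
      rw [hdecomp, List.countP_append]
      push_cast; ring
    have hiff : (List.take (b - a) (List.drop a fence)).contains true = true
        ↔ 0 < (List.take (b - a) (List.drop a fence)).countP (fun x => x) := by
      rw [List.contains_iff_mem, List.countP_pos_iff]
      constructor
      · intro hm; exact ⟨true, hm, by simp⟩
      · intro ⟨x, hx, hxt⟩
        have hxe : x = true := by simpa using hxt
        rw [← hxe]; exact hx
    have hq : ((a : Int) < (b : Int)) := by exact_mod_cast hab
    simp only [hq, decide_true, Bool.true_and]
    cases hcon : (List.take (b - a) (List.drop a fence)).contains true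
    · symm
      simp only [decide_eq_false_iff_not]
      intro hgt
      have hz : ¬ (0 < (List.take (b - a) (List.drop a fence)).countP (fun x => x)) := by
        intro hp
        rw [hiff.mpr hp] at hcon
        exact absurd hcon (by decide)
      omega
    · symm
      simp only [decide_eq_true_iff]
      have hp := hiff.mp hcon
      omega
  · have hba : b - a = 0 := by omega
    rw [hba]
    have hq : ¬ ((a : Int) < (b : Int)) := by exact_mod_cast hab
    simp [hq]

theorem pvHasFault_eq (fence : List Bool) (s e : Int) :
    pvHasFaultP fence.length (pvBuildPref fence) s e = pvHasFault fence s e := by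
  rw [pvHasFaultP_cnt, pvHasFault_cnt]

-- if a range contains a fault and its left half does not, the right half does
theorem pvHasFault_split (fence : List Bool) (s m e : Int)
    (h1 : pvHasFault fence s e = true) (h2 : pvHasFault fence s m = false) :
    pvHasFault fence m e = true := by
  rw [pvHasFault_cnt] at h1 h2 ⊢
  simp only [Bool.and_eq_true, decide_eq_true_iff] at h1 ⊢
  simp only [Bool.and_eq_false_iff, decide_eq_false_iff_not] at h2
  obtain ⟨hab, hcnt⟩ := h1
  rcases h2 with h2 | h2
  · have hma : PySem.List.clampIdx fence.length m ≤ PySem.List.clampIdx fence.length s := by omega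
    have g := pvCnt_mono fence hma
    exact ⟨by omega, by omega⟩
  · have hmb : PySem.List.clampIdx fence.length m < PySem.List.clampIdx fence.length e := by
      by_contra hcon
      have hbm : PySem.List.clampIdx fence.length e ≤ PySem.List.clampIdx fence.length m := by omega
      have g := pvCnt_mono fence hbm
      omega
    exact ⟨by omega, by omega⟩

theorem pvHasFault_neg_one_zero (fence : List Bool) : pvHasFault fence (-1) 0 = false := by
  rw [pvHasFault_cnt]
  have h0 : PySem.List.clampIdx fence.length 0 = 0 := by
    simp [PySem.List.clampIdx]
  rw [h0]
  simp

theorem pvTdiv_bounds (s e : Int) (h : s + 2 ≤ e) :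
    s < Int.tdiv (s + e) 2 ∧ Int.tdiv (s + e) 2 < e := by
  have h1 := Int.tdiv_add_tmod (s + e) 2
  have h2 := Int.tmod_two_eq (s + e)
  omega

-- one-step unfolding lemmas for the two programs
theorem pvFFI_nofault (fence : List Bool) (fuel : Nat) (s e : Int)
    (h : pvHasFault fence s e = false) : pvFindFFI fence (fuel+1) s e = (-1, 1) := by
  simp [pvFindFFI, h]

theorem pvFFI_leaf (fence : List Bool) (fuel : Nat) (s e : Int)
    (h : pvHasFault fence s e = true) (hl : s + 1 = e) : pvFindFFI fence (fuel+1) s e = (s, 1) := by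
  simp [pvFindFFI, h, hl]

theorem pvFFI_left (fence : List Bool) (fuel : Nat) (s e : Int)
    (h : pvHasFault fence s e = true) (hl : ¬ s + 1 = e)
    (hc1 : (pvFindFFI fence fuel s (Int.tdiv (s + e) 2)).1 ≠ -1) :
    pvFindFFI fence (fuel+1) s e
      = ((pvFindFFI fence fuel s (Int.tdiv (s + e) 2)).1,
         1 + (pvFindFFI fence fuel s (Int.tdiv (s + e) 2)).2) := by
  simp [pvFindFFI, h, hl, hc1]

theorem pvFFI_right (fence : List Bool) (fuel : Nat) (s e : Int)
    (h : pvHasFault fence s e = true) (hl : ¬ s + 1 = e)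
    (hc1 : (pvFindFFI fence fuel s (Int.tdiv (s + e) 2)).1 = -1) :
    pvFindFFI fence (fuel+1) s e
      = ((pvFindFFI fence fuel (Int.tdiv (s + e) 2) e).1,
         1 + (pvFindFFI fence fuel s (Int.tdiv (s + e) 2)).2
           + (pvFindFFI fence fuel (Int.tdiv (s + e) 2) e).2) := by
  simp [pvFindFFI, h, hl, hc1]

theorem pvDesc_nofault (fence : List Bool) (fuel : Nat) (s e acc : Int)
    (h : pvHasFault fence s e = false) :
    pvDescend fence.length (pvBuildPref fence) (fuel+1) s e acc = (-1, acc + 1) := by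
  simp [pvDescend, pvHasFault_eq, h]

theorem pvDesc_leaf (fence : List Bool) (fuel : Nat) (s e acc : Int)
    (h : pvHasFault fence s e = true) (hl : s + 1 = e) :
    pvDescend fence.length (pvBuildPref fence) (fuel+1) s e acc = (s, acc + 1) := by
  simp [pvDescend, pvHasFault_eq, h, hl]

theorem pvDesc_left (fence : List Bool) (fuel : Nat) (s e acc : Int)
    (h : pvHasFault fence s e = true) (hl : ¬ s + 1 = e)
    (h2 : pvHasFault fence s (Int.tdiv (s + e) 2) = true) :
    pvDescend fence.length (pvBuildPref fence) (fuel+1) s e acc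
      = pvDescend fence.length (pvBuildPref fence) fuel s (Int.tdiv (s + e) 2) (acc + 1) := by
  simp [pvDescend, pvHasFault_eq, h, hl, h2]

theorem pvDesc_right (fence : List Bool) (fuel : Nat) (s e acc : Int)
    (h : pvHasFault fence s e = true) (hl : ¬ s + 1 = e)
    (h2 : pvHasFault fence s (Int.tdiv (s + e) 2) = false) :
    pvDescend fence.length (pvBuildPref fence) (fuel+1) s e acc
      = pvDescend fence.length (pvBuildPref fence) fuel (Int.tdiv (s + e) 2) e (acc + 1 + 1) := by
  simp [pvDescend, pvHasFault_eq, h, hl, h2]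

-- core lemma: the iterative descent computes find_first_fault_in's result pair, and the
-- returned fault is -1 exactly when the range is fault-free
theorem pvDescend_eq (fence : List Bool) : ∀ (fuel : Nat) (s e acc : Int), s < e → (e - s).toNat < fuel →
    (pvDescend fence.length (pvBuildPref fence) fuel s e acc
        = ((pvFindFFI fence fuel s e).1, acc + (pvFindFFI fence fuel s e).2))
    ∧ ((pvFindFFI fence fuel s e).1 = -1 ↔ pvHasFault fence s e = false) := by
  intro fuel
  induction fuel with
  | zero => intro s e acc _ hf; omega
  | succ fuel ih =>
    intro s e acc hse hf
    cases hfault : pvHasFault fence s e with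
    | false =>
      rw [pvFFI_nofault fence fuel s e hfault, pvDesc_nofault fence fuel s e acc hfault]
      exact ⟨rfl, by simp⟩
    | true =>
      by_cases hleaf : s + 1 = e
      · rw [pvFFI_leaf fence fuel s e hfault hleaf, pvDesc_leaf fence fuel s e acc hfault hleaf]
        refine ⟨rfl, ?_, ?_⟩
        · intro hs1
          exfalso
          have hsv : s = -1 := hs1
          rw [hsv] at hleaf hfault
          have he0 : e = 0 := by omega
          rw [he0] at hfault
          rw [pvHasFault_neg_one_zero] at hfault
          exact absurd hfault (by decide)
        · intro hff; exact absurd hff (by decide)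
      · have he2 : s + 2 ≤ e := by omega
        obtain ⟨hm1, hm2⟩ := pvTdiv_bounds s e he2
        have hfm : ((Int.tdiv (s + e) 2) - s).toNat < fuel := by omega
        have hfe : (e - (Int.tdiv (s + e) 2)).toNat < fuel := by omega
        cases hleft : pvHasFault fence s (Int.tdiv (s + e) 2) with
        | true =>
          obtain ⟨ihd, ihiff⟩ := ih s (Int.tdiv (s + e) 2) (acc + 1) hm1 hfm
          have hc1 : (pvFindFFI fence fuel s (Int.tdiv (s + e) 2)).1 ≠ -1 := by
            intro hh; rw [ihiff, hleft] at hh; exact absurd hh (by decide)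
          rw [pvFFI_left fence fuel s e hfault hleaf hc1,
              pvDesc_left fence fuel s e acc hfault hleaf hleft, ihd]
          refine ⟨?_, ?_, ?_⟩
          · congr 1
            ring
          · intro hh; exact absurd hh hc1
          · intro hff; exact absurd hff (by decide)
        | false =>
          have hright : pvHasFault fence (Int.tdiv (s + e) 2) e = true :=
            pvHasFault_split fence s (Int.tdiv (s + e) 2) e hfault hleft
          have hc1val : pvFindFFI fence fuel s (Int.tdiv (s + e) 2) = (-1, 1) := by
            cases fuel with
            | zero => omega
            | succ f => exact pvFFI_nofault fence f s (Int.tdiv (s + e) 2) hleft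
          obtain ⟨ihd, ihiff⟩ := ih (Int.tdiv (s + e) 2) e (acc + 1 + 1) hm2 hfe
          have hc2 : (pvFindFFI fence fuel (Int.tdiv (s + e) 2) e).1 ≠ -1 := by
            intro hh; rw [ihiff, hright] at hh; exact absurd hh (by decide)
          rw [pvFFI_right fence fuel s e hfault hleaf (by rw [hc1val]),
              pvDesc_right fence fuel s e acc hfault hleaf hleft, ihd, hc1val]
          refine ⟨?_, ?_, ?_⟩
          · congr 1
            ring
          · intro hh; exact absurd hh hc2
          · intro hff; exact absurd hff (by decide)

theorem pvLoop_eq (fence : List Bool) (mcd end_ : Int) : ∀ (fuel : Nat) (ss se acc : Int),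
    (ss < end_ → ss < se ∧ 1 ≤ mcd) →
    pvLoopA fence mcd end_ fuel ss se acc
      = pvLoopB fence.length (pvBuildPref fence) mcd end_ fuel ss se acc := by
  intro fuel
  induction fuel with
  | zero => intro ss se acc _; rfl
  | succ fuel ih =>
    intro ss se acc hinv
    by_cases hss : ss < end_
    · obtain ⟨hlt, hmcd⟩ := hinv hss
      have hfuel : (se - ss).toNat < (se - ss).toNat + 1 := by omega
      obtain ⟨hd, _⟩ := pvDescend_eq fence ((se - ss).toNat + 1) ss se 0 hlt hfuel
      simp only [pvLoopA, pvLoopB, if_pos hss]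
      rw [hd]
      simp only [zero_add]
      apply ih
      intro hss2
      exact ⟨by omega, hmcd⟩
    · simp [pvLoopA, pvLoopB, hss]

-- ===== VERDICT (by name: the statement is the Claim_ definition above) =====
theorem check_fence_limit_skips_spec : Claim_equal_check_fence_limit_skips := by
  intro fence mcd start end_ _ hpre
  unfold Spec_check_fence_limit_skips check_fence_limit_skips check_fence_limit_skips_alt
  apply pvLoop_eq
  intro hlt
  rcases hpre with h | h
  · exact ⟨by omega, by omega⟩
  · omega
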